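-- pv_equiv track=rewrite | github.com/ppwang06/frida_js | web/yuanrenxue/match_1/match_1.py | str2binl
-- ===== SOURCE A (Python) =====
-- chrsz = 16
--
-- def str2binl(s):
--     bin = []
--     mask = (1 << chrsz) - 1
--     for b in range(0, len(s) * chrsz, chrsz):
--         index = b >> 5
--         while len(bin) <= index:
--             bin.append(0)
--         char_code = ord(s[b // chrsz]) & mask
--         bin[index] |= (char_code << (b % 32))
--         bin[index] &= 0xFFFFFFFF
--     return bin
-- ===== SOURCE B (Python) =====
-- chrsz = 16
--
-- def str2binl(s):
--     words = []
--     for i in range(0, len(s), 2):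
--         low = ord(s[i]) & 0xFFFF
--         high = (ord(s[i + 1]) & 0xFFFF) if i + 1 < len(s) else 0
--         words.append(low | (high << 16))
--     return words
-- ===== Notes on version B (the rewrite author's own statement) =====
-- stated objective: faster
-- what changed: B iterates over character pairs producing one 32-bit word per iteration directly, replacing A's bit-offset loop with its b>>5 index arithmetic, the while-loop that grows the list with zeros, and the in-place |=/&= accumulation.
import Mathlib
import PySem

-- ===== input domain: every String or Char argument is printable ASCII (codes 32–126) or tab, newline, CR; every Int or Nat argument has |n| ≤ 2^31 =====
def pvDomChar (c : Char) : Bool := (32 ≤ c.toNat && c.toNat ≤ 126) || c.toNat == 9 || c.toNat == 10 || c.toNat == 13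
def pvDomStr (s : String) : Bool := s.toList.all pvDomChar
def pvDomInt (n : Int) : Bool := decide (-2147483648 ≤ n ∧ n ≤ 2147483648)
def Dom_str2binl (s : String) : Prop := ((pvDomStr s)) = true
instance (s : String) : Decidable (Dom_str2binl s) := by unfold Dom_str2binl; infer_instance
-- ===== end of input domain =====

-- B iterates over character pairs, producing one 32-bit word per pair directly (simpler:
-- no bit-offset loop, no while-grow of the list, no in-place |=/&= accumulation).

-- ===== PORT A =====
-- the 'while len(bin) <= index: bin.append(0)' loop
def pvPad (bin : List Int) (index : Int) : List Int :=
  if h : (bin.length : Int) ≤ index then pvPad (bin ++ [0]) index else bin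
  termination_by (index + 1 - bin.length).toNat
  decreasing_by simp; omega

-- one iteration of A's 'for b in range(0, len(s)*chrsz, chrsz)' body
def pvStepA (s : String) (bin : List Int) (b : Int) : List Int :=
  let mask : Int := (1 <<< 16) - 1
  let index : Int := b >>> (5 : Nat)
  let bin := pvPad bin index
  match PySem.Str.pyGet? s (PySem.Int.floordiv b 16) with
  | none => bin   -- IndexError in Python; unreachable for b in range
  | some c =>
    let char_code : Int := PySem.Int.band (c.toNat : Int) mask
    match PySem.List.pyGet? bin index with
    | none => bin -- unreachable: padded to length > index
    | some cur =>
      bin.set index.toNat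
        (PySem.Int.band (PySem.Int.bor cur (char_code <<< (PySem.Int.mod b 32).toNat)) 0xFFFFFFFF)

def str2binl (s : String) : List Int :=
  (PySem.List.pyRange 0 (PySem.Str.len s * 16) 16).foldl (pvStepA s) []

-- ===== PORT B =====
-- Source B's loop 'for i in range(0, len(s), 2)' as the obvious pair recursion on the characters
def pvPairs : List Char → List Int
  | [] => []
  | [c] => [PySem.Int.bor (PySem.Int.band (c.toNat : Int) 0xFFFF) ((0 : Int) <<< (16 : Nat))]
  | c :: d :: rest =>
      PySem.Int.bor (PySem.Int.band (c.toNat : Int) 0xFFFF)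
          ((PySem.Int.band (d.toNat : Int) 0xFFFF) <<< (16 : Nat)) :: pvPairs rest

def str2binl_alt (s : String) : List Int := pvPairs s.toList

-- ===== PRECONDITION & SPEC =====
def Spec_str2binl (s : String) (out : List Int) : Prop := out = str2binl_alt s
instance (s : String) (out : List Int) : Decidable (Spec_str2binl s out) := by unfold Spec_str2binl; infer_instance

-- ===== CLAIM (what is proved, stated in full; the proofs are below) =====
def Claim_equal_str2binl : Prop := ∀ (s : String), Dom_str2binl s → Spec_str2binl s (str2binl s)

-- ===== LEMMAS AND PROOFS =====

theorem pvPad_of_lt (bin : List Int) (index : Int) (h : index < (bin.length : Int)) :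
    pvPad bin index = bin := by
  rw [pvPad]; simp [not_le.mpr h]
theorem pvPad_step (bin : List Int) (index : Int) (h : (bin.length : Int) ≤ index) :
    pvPad bin index = pvPad (bin ++ [0]) index := by
  rw [pvPad]; simp [h]
theorem set_append_len {α : Type} (l : List α) (x v : α) :
    (l ++ [x]).set l.length v = l ++ [v] := by
  rw [List.set_append]; simp

theorem stepA_even (s : String) (pre : List Int) (c : Char)
    (hc : s.toList[2 * pre.length]? = some c) :
    pvStepA s pre (16 * ((2 * pre.length : Nat) : Int)) =
      pre ++ [((c.toNat &&& 65535 : Nat) : Int)] := by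
  have hidx : (16 * ((2 * pre.length : Nat) : Int)) >>> (5:Nat) = (pre.length : Int) := by
    rw [Int.shiftRight_eq_div_pow]; push_cast; omega
  have hfd : PySem.Int.floordiv (16 * ((2 * pre.length : Nat) : Int)) 16 = ((2 * pre.length : Nat) : Int) := by
    rw [PySem.Int.floordiv_eq_ediv_of_pos (by norm_num)]; push_cast; omega
  have hmod : (PySem.Int.mod (16 * ((2 * pre.length : Nat) : Int)) 32).toNat = 16 * (2 * pre.length) % 32 := by
    rw [PySem.Int.mod_eq_emod_of_pos (by norm_num)]; push_cast; omega
  simp only [pvStepA, hidx, hfd, hmod]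
  rw [pvPad_step _ _ (by omega), pvPad_of_lt _ _ (by simp)]
  rw [PySem.Str.pyGet?_natCast, hc]
  rw [show ((pre.length : Int)) = ((pre.length : Nat) : Int) from rfl, PySem.List.pyGet?_natCast]
  simp only [List.getElem?_concat_length]
  have h32 : 16 * (2 * pre.length) % 32 = 0 := by omega
  rw [h32]
  simp only [Int.toNat_natCast, set_append_len]
  congr 2
  have hmask : ((1 <<< 16 : Int) - 1) = ((65535:Nat):Int) := by decide
  rw [hmask, PySem.Int.band_natCast]
  rw [Int.shiftLeft_zero]
  rw [show (0:Int) = ((0:Nat):Int) from rfl, PySem.Int.bor_natCast]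
  rw [show (4294967295:Int) = ((4294967295:Nat):Int) by norm_num, PySem.Int.band_natCast]
  congr 1
  rw [Nat.zero_or]
  rw [show (4294967295:Nat) = 2^32-1 from rfl, Nat.and_two_pow_sub_one_eq_mod]
  exact Nat.mod_eq_of_lt (lt_of_le_of_lt Nat.and_le_right (by norm_num))

theorem stepA_odd (s : String) (pre : List Int) (lowN : Nat) (d : Char)
    (hlow : lowN < 65536)
    (hd : s.toList[2 * pre.length + 1]? = some d) :
    pvStepA s (pre ++ [(lowN : Int)]) (16 * ((2 * pre.length + 1 : Nat) : Int)) =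
      pre ++ [((lowN ||| ((d.toNat &&& 65535) <<< 16) : Nat) : Int)] := by
  have hidx : (16 * ((2 * pre.length + 1 : Nat) : Int)) >>> (5:Nat) = (pre.length : Int) := by
    rw [Int.shiftRight_eq_div_pow]; push_cast; omega
  have hfd : PySem.Int.floordiv (16 * ((2 * pre.length + 1 : Nat) : Int)) 16
      = ((2 * pre.length + 1 : Nat) : Int) := by
    rw [PySem.Int.floordiv_eq_ediv_of_pos (by norm_num)]; push_cast; omega
  have hmod : (PySem.Int.mod (16 * ((2 * pre.length + 1 : Nat) : Int)) 32).toNat = 16 := by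
    rw [PySem.Int.mod_eq_emod_of_pos (by norm_num)]; push_cast; omega
  simp only [pvStepA, hidx, hfd, hmod]
  rw [pvPad_of_lt _ _ (by simp)]
  rw [PySem.Str.pyGet?_natCast, hd]
  rw [show ((pre.length : Int)) = ((pre.length : Nat) : Int) from rfl, PySem.List.pyGet?_natCast]
  simp only [List.getElem?_concat_length]
  simp only [Int.toNat_natCast, set_append_len]
  congr 2
  have hmask : ((1 <<< 16 : Int) - 1) = ((65535:Nat):Int) := by decide
  rw [hmask, PySem.Int.band_natCast]
  rw [← Int.natCast_shiftLeft, PySem.Int.bor_natCast]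
  rw [show (4294967295:Int) = ((4294967295:Nat):Int) by norm_num, PySem.Int.band_natCast]
  congr 1
  rw [show (4294967295:Nat) = 2^32-1 from rfl, Nat.and_two_pow_sub_one_eq_mod]
  refine Nat.mod_eq_of_lt (Nat.or_lt_two_pow (by omega) ?_)
  rw [Nat.shiftLeft_eq]
  have : d.toNat &&& 65535 ≤ 65535 := Nat.and_le_right
  calc (d.toNat &&& 65535) * 2^16 ≤ 65535 * 2^16 := Nat.mul_le_mul_right _ this
    _ < 2^32 := by norm_num
theorem cast_word (c d : Char) :
    ((c.toNat &&& 65535 ||| ((d.toNat &&& 65535) <<< 16) : Nat) : Int)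
      = PySem.Int.bor (PySem.Int.band (c.toNat : Int) 65535)
          ((PySem.Int.band (d.toNat : Int) 65535) <<< (16:Nat)) := by
  rw [show (65535:Int) = ((65535:Nat):Int) by norm_num]
  simp only [PySem.Int.band_natCast]
  rw [← Int.natCast_shiftLeft, PySem.Int.bor_natCast]

theorem cast_low (c : Char) :
    ((c.toNat &&& 65535 : Nat) : Int)
      = PySem.Int.bor (PySem.Int.band (c.toNat : Int) 65535) ((0 : Int) <<< (16:Nat)) := by
  rw [show (65535:Int) = ((65535:Nat):Int) by norm_num, PySem.Int.band_natCast]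
  simp

theorem key (s : String) (tail : List Char) : ∀ (pre : List Int),
    s.toList.drop (2 * pre.length) = tail →
    (List.range' (2 * pre.length) tail.length 1).foldl
        (fun bin (k : Nat) => pvStepA s bin (16 * (k : Int))) pre = pre ++ pvPairs tail := by
  induction tail using pvPairs.induct with
  | case1 => intro pre _; simp [pvPairs]
  | case2 c =>
    intro pre hdrop
    have hc : s.toList[2 * pre.length]? = some c := by
      have h0 : (s.toList.drop (2 * pre.length))[0]? = some c := by rw [hdrop]; rfl
      rwa [List.getElem?_drop] at h0
    simp only [List.length_cons, List.length_nil]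
    rw [List.range'_succ, show List.range' (2*pre.length+1) 0 1 = [] from rfl]
    simp only [List.foldl_cons, List.foldl_nil]
    rw [stepA_even s pre c hc, pvPairs, cast_low]
  | case3 c d rest ih =>
    intro pre hdrop
    have hc : s.toList[2 * pre.length]? = some c := by
      have h0 : (s.toList.drop (2 * pre.length))[0]? = some c := by rw [hdrop]; rfl
      rwa [List.getElem?_drop] at h0
    have hd : s.toList[2 * pre.length + 1]? = some d := by
      have h1 : (s.toList.drop (2 * pre.length))[1]? = some d := by rw [hdrop]; rfl
      rwa [List.getElem?_drop] at h1
    simp only [List.length_cons]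
    rw [List.range'_succ, List.range'_succ]
    simp only [List.foldl_cons]
    rw [stepA_even s pre c hc]
    have hlow : c.toNat &&& 65535 < 65536 :=
      lt_of_le_of_lt Nat.and_le_right (by norm_num)
    rw [stepA_odd s pre (c.toNat &&& 65535) d hlow hd]
    have hdrop' : s.toList.drop (2 * (pre ++ [((c.toNat &&& 65535 |||
        ((d.toNat &&& 65535) <<< 16) : Nat) : Int)]).length) = rest := by
      simp only [List.length_append, List.length_cons, List.length_nil]
      rw [Nat.mul_add, ← List.drop_drop, hdrop]
      rfl
    have := ih (pre ++ [((c.toNat &&& 65535 ||| ((d.toNat &&& 65535) <<< 16) : Nat) : Int)]) hdrop'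
    simp only [List.length_append, List.length_cons, List.length_nil] at this
    rw [show 2*pre.length+1+1 = 2*(pre.length+1) by ring, this]
    rw [pvPairs, cast_word]
    simp

-- ===== VERDICT (by name: the statement is the Claim_ definition above) =====
theorem str2binl_spec : Claim_equal_str2binl := by
  unfold Claim_equal_str2binl Spec_str2binl
  intro s _
  have h := key s s.toList [] (by simp)
  simp only [List.length_nil, Nat.mul_zero, List.nil_append] at h
  rw [str2binl, str2binl_alt, PySem.Str.len_eq,
    PySem.List.pyRange_of_pos 0 ((s.toList.length : Int) * 16) (s := 16) (by norm_num), List.foldl_map]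
  have hif : (if (0:Int) < (s.toList.length : Int) * 16 then
      (((s.toList.length : Int) * 16 - 0 + 16 - 1) / 16).toNat else 0) = s.toList.length := by
    split_ifs with hlt <;> omega
  rw [hif, List.range_eq_range', ← h]
  congr 1
  funext bin k
  norm_num
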